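-- pv_equiv track=rewrite | github.com/itsabdullah15/customer-support-rag | app/rag_chain.py | truncate_documents
-- ===== SOURCE A (Python) =====
-- from typing import List
--
-- def truncate_documents(docs: List[str], max_length: int) -> str:
--     context = ""
--     for doc in docs:
--         if len(context) + len(doc) + 2 > max_length:
--             remaining = max_length - len(context) - 2
--             context += doc[:remaining] + "\n\n"
--             break
--         context += doc + "\n\n"
--     return context.strip()
-- ===== SOURCE B (Python) =====
-- def truncate_documents(docs, max_length):
--     # Prefix-table decomposition: cumulative lengths first, then find the cut
--     # point k, then assemble the string in one go.
--     prefix = [0]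
--     for d in docs:
--         prefix.append(prefix[-1] + len(d) + 2)
--     k = next((i for i in range(len(docs)) if prefix[i + 1] > max_length), len(docs))
--     parts = [d + "\n\n" for d in docs[:k]]
--     if k < len(docs):
--         parts.append(docs[k][:max_length - prefix[k] - 2] + "\n\n")
--     return "".join(parts).strip()
-- ===== Notes on version B (the rewrite author's own statement) =====
-- stated objective: alternative
-- what changed: Replaces the incremental accumulate-and-test string loop with a prefix table of cumulative lengths, a scan for the first cut index k, and a single join of docs[:k] plus the sliced doc at k.
import Mathlib
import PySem

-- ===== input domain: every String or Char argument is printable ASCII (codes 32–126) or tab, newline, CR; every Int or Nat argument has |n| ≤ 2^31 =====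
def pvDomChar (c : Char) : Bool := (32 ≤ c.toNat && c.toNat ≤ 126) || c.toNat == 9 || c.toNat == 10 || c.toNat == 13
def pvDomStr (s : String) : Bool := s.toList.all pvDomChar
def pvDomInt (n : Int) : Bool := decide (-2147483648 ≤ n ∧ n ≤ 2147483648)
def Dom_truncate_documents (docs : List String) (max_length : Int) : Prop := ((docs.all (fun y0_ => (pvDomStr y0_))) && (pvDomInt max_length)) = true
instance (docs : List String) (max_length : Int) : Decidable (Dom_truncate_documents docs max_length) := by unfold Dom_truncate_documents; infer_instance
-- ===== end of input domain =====

-- B replaces A's accumulate-and-test loop by a prefix table of cumulative lengths,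
-- a scan for the cut index and a single join (objective: alternative, same cost).

-- ===== PORT A =====
-- A's for-loop over docs with the accumulated string `context`; break = the non-recursive branch.
def tdA_go (docs : List String) (context : List Char) (max_length : Int) : List Char :=
  match docs with
  | [] => context
  | d :: rest =>
    if (context.length : Int) + d.toList.length + 2 > max_length then
      -- remaining = max_length - len(context) - 2; context += doc[:remaining] + "\n\n"; break
      context ++ PySem.List.slice d.toList none (some (max_length - context.length - 2)) ++ ['\n', '\n']
    else
      tdA_go rest (context ++ d.toList ++ ['\n', '\n']) max_length

def truncate_documents (docs : List String) (max_length : Int) : String :=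
  String.mk (PySem.Chars.strip (tdA_go docs [] max_length))

-- ===== PORT B =====
def truncate_documents_alt (docs : List String) (max_length : Int) : String :=
  -- prefix = [0]; for d in docs: prefix.append(prefix[-1] + len(d) + 2)
  let pfx := docs.foldl
    (fun acc d => acc ++ [PySem.List.pyGetD acc (-1) 0 + (d.toList.length : Int) + 2]) [(0 : Int)]
  -- k = next((i for i in range(len(docs)) if prefix[i+1] > max_length), len(docs))
  let k : Nat :=
    (((List.range docs.length).find?
        (fun (i : Nat) => decide (PySem.List.pyGetD pfx ((i : Int) + 1) 0 > max_length))).getD docs.length)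
  -- parts = [d + "\n\n" for d in docs[:k]]   (k is a nonnegative Nat, so docs[:k] is take k)
  let parts := (docs.take k).map (fun d => d.toList ++ ['\n', '\n'])
  -- if k < len(docs): parts.append(docs[k][:max_length - prefix[k] - 2] + "\n\n")
  let parts :=
    if k < docs.length then
      parts ++ [PySem.List.slice (docs.getD k "").toList none
                  (some (max_length - PySem.List.pyGetD pfx (k : Int) 0 - 2)) ++ ['\n', '\n']]
    else parts
  -- return "".join(parts).strip()
  String.mk (PySem.Chars.strip parts.flatten)

-- ===== PRECONDITION & SPEC =====
def Spec_truncate_documents (docs : List String) (max_length : Int) (out : String) : Prop := out = truncate_documents_alt docs max_length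
instance (docs : List String) (max_length : Int) (out : String) : Decidable (Spec_truncate_documents docs max_length out) := by unfold Spec_truncate_documents; infer_instance

-- ===== CLAIM (what is proved, stated in full; the proofs are below) =====
def Claim_equal_truncate_documents : Prop := ∀ (docs : List String) (max_length : Int), Dom_truncate_documents docs max_length → Spec_truncate_documents docs max_length (truncate_documents docs max_length)

-- ===== LEMMAS AND PROOFS =====

-- Common characterisation of the pre-strip content: recursion on the documents,
-- `ml` being the remaining length budget.
def trCore (ds : List (List Char)) (ml : Int) : List Char :=
  match ds with
  | [] => []
  | d :: r =>
    if (d.length : Int) + 2 > ml then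
      PySem.List.slice d none (some (ml - 2)) ++ ['\n', '\n']
    else
      d ++ ['\n', '\n'] ++ trCore r (ml - d.length - 2)

-- the tail of B's prefix table after absolute offset t
def pfxTail (docs : List String) (t : Int) : List Int :=
  match docs with
  | [] => []
  | d :: r => (t + d.toList.length + 2) :: pfxTail r (t + d.toList.length + 2)

theorem tdA_go_eq (docs : List String) (ctx : List Char) (ml : Int) :
    tdA_go docs ctx ml = ctx ++ trCore (docs.map String.toList) (ml - ctx.length) := by
  induction docs generalizing ctx ml with
  | nil => simp [tdA_go, trCore]
  | cons d r ih =>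
    simp only [tdA_go, List.map_cons, trCore]
    by_cases h : (ctx.length : Int) + d.toList.length + 2 > ml
    · rw [if_pos h, if_pos (by omega)]
      rw [List.append_assoc]
    · rw [if_neg h, if_neg (by omega), ih]
      rw [show (ml - (((ctx ++ d.toList ++ ['\n', '\n']).length : Nat) : Int))
          = ml - ctx.length - d.toList.length - 2 from by
        simp; omega]
      simp [List.append_assoc]

theorem pfxTail_shift (docs : List String) (t s : Int) :
    pfxTail docs (t + s) = (pfxTail docs t).map (· + s) := by
  induction docs generalizing t with
  | nil => simp [pfxTail]
  | cons d r ih =>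
    simp only [pfxTail, List.map_cons]
    congr 1
    · omega
    · rw [show t + s + (d.toList.length : Int) + 2 = (t + d.toList.length + 2) + s by ring, ih]

theorem length_pfxTail (docs : List String) (t : Int) :
    (pfxTail docs t).length = docs.length := by
  induction docs generalizing t with
  | nil => rfl
  | cons d r ih => simp [pfxTail, ih]

theorem foldl_prefix (docs : List String) (acc : List Int) (t : Int)
    (h : acc.getLast? = some t) :
    docs.foldl (fun acc d => acc ++ [PySem.List.pyGetD acc (-1) 0 + (d.toList.length : Int) + 2]) acc
      = acc ++ pfxTail docs t := by
  induction docs generalizing acc t with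
  | nil => simp [pfxTail]
  | cons d r ih =>
    have hne : acc ≠ [] := by
      intro hnil; rw [hnil] at h; simp at h
    simp only [List.foldl_cons, pfxTail]
    rw [PySem.List.pyGetD_neg_one acc hne (d := 0)]
    have hlast : acc.getLast hne = t := by
      have := List.getLast?_eq_some_getLast hne
      rw [this] at h; exact Option.some.inj h
    rw [hlast, ih (acc ++ [t + ↑d.toList.length + 2]) (t + ↑d.toList.length + 2) (by simp)]
    simp

theorem find?_congr_mem {α : Type} (l : List α) (p q : α → Bool)
    (h : ∀ x ∈ l, p x = q x) : l.find? p = l.find? q := by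
  induction l with
  | nil => rfl
  | cons a l ih =>
    simp only [List.find?_cons]
    rw [h a (List.mem_cons_self)]
    cases q a
    · exact ih (fun x hx => h x (List.mem_cons_of_mem a hx))
    · rfl

theorem getD_map_add (L : List Int) (w : Int) (i : Nat) (hi : i < L.length) :
    (L.map (· + w)).getD i 0 = L.getD i 0 + w := by
  rw [List.getD_eq_getElem?_getD, List.getD_eq_getElem?_getD, List.getElem?_map,
      List.getElem?_eq_getElem hi]
  simp

-- B's whole computation, with the prefix table made explicit, equals trCore.
theorem bodyB_eq (docs : List String) (ml : Int) :
    (let pfx := (0 : Int) :: pfxTail docs 0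
     let k : Nat :=
       (((List.range docs.length).find?
           (fun i => decide (pfx.getD (i + 1) 0 > ml))).getD docs.length)
     let parts := (docs.take k).map (fun d => d.toList ++ ['\n', '\n'])
     let parts :=
       if k < docs.length then
         parts ++ [PySem.List.slice (docs.getD k "").toList none
                     (some (ml - pfx.getD k 0 - 2)) ++ ['\n', '\n']]
       else parts
     parts.flatten)
      = trCore (docs.map String.toList) ml := by
  induction docs generalizing ml with
  | nil => simp [trCore]
  | cons d r ih =>
    simp only []
    set w : Int := (d.toList.length : Int) + 2 with hw
    have hpfx : pfxTail (d :: r) 0 = w :: (pfxTail r 0).map (· + w) := by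
      simp only [pfxTail]
      congr 1
      · omega
      · rw [show (0 : Int) + (d.toList.length : Int) + 2 = 0 + w by rw [hw]; ring, pfxTail_shift]
    rw [hpfx, List.length_cons, List.range_succ_eq_map]
    simp only [List.map_cons, trCore]
    by_cases hcase : w > ml
    · rw [List.find?_cons_of_pos (by simp [hcase])]
      simp only [Option.getD_some, List.take_zero, List.map_nil, List.nil_append,
        List.getD_cons_zero]
      rw [if_pos (Nat.zero_lt_succ _), if_pos (by omega)]
      simp only [List.flatten_cons, List.flatten_nil, List.append_nil]
      congr 3
      omega
    · rw [List.find?_cons_of_neg (by simp [hcase]), List.find?_map]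
      rw [if_neg (show ¬((d.toList.length : Int) + 2 > ml) from by omega),
        show ml - (d.toList.length : Int) - 2 = ml - w from by omega]
      rw [find?_congr_mem _ _
        (fun i => decide (((0 : Int) :: pfxTail r 0).getD (i + 1) 0 > ml - w)) ?_]
      · have ihw := ih (ml - w)
        simp only [] at ihw
        cases hfq : (List.range r.length).find?
            (fun i => decide (((0 : Int) :: pfxTail r 0).getD (i + 1) 0 > ml - w)) with
        | none =>
          rw [hfq] at ihw
          simp only [Option.map_none, Option.getD_none] at ihw ⊢
          rw [if_neg (lt_irrefl _)] at ihw
          rw [if_neg (lt_irrefl _)]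
          simp only [List.take_succ_cons, List.map_cons, List.flatten_cons]
          rw [ihw]
        | some j =>
          have hj : j < r.length := List.mem_range.mp (List.mem_of_find?_eq_some hfq)
          rw [hfq] at ihw
          simp only [Option.map_some, Option.getD_some] at ihw ⊢
          rw [if_pos hj] at ihw
          rw [if_pos (by omega)]
          simp only [List.take_succ_cons, List.map_cons, List.cons_append,
            List.flatten_cons, List.getD_cons_succ]
          have hg : (w :: (pfxTail r 0).map (· + w)).getD j 0
              = ((0 : Int) :: pfxTail r 0).getD j 0 + w := by
            cases j with
            | zero => simp
            | succ m =>
              simp only [List.getD_cons_succ]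
              exact getD_map_add _ _ _ (by rw [length_pfxTail]; omega)
          rw [hg]
          rw [show ml - (((0 : Int) :: pfxTail r 0).getD j 0 + w) - 2
              = ml - w - ((0 : Int) :: pfxTail r 0).getD j 0 - 2 by ring]
          rw [ihw]
      · intro i hi
        simp only [List.mem_range] at hi
        simp only [Function.comp_apply, Nat.succ_eq_add_one, List.getD_cons_succ]
        rw [getD_map_add _ _ _ (by rw [length_pfxTail]; omega)]
        exact decide_eq_decide.mpr (by omega)

theorem truncate_documents_alt_eq (docs : List String) (ml : Int) :
    truncate_documents_alt docs ml
      = String.mk (PySem.Chars.strip (trCore (docs.map String.toList) ml)) := by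
  unfold truncate_documents_alt
  simp only []
  rw [foldl_prefix docs [0] 0 (by simp)]
  simp only [show ∀ i : Nat, ((i : Int) + 1) = (((i + 1 : Nat)) : Int) from fun i => by push_cast; ring]
  simp only [PySem.List.pyGetD_natCast]
  simp only [List.singleton_append]
  have h := bodyB_eq docs ml
  simp only [] at h
  exact congrArg (fun l => String.mk (PySem.Chars.strip l)) h

-- ===== VERDICT (by name: the statement is the Claim_ definition above) =====
theorem truncate_documents_spec : Claim_equal_truncate_documents := by
  intro docs ml _
  unfold Spec_truncate_documents
  rw [truncate_documents_alt_eq]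
  unfold truncate_documents
  rw [tdA_go_eq]
  simp
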